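-- pv_equiv track=rewrite | github.com/diegoasanch/Fundamentos-de-Progra-2019 | TP6 COMPLETE/func.py | deteccion_de_orden
-- ===== SOURCE A (Python) =====
-- def deteccion_de_orden(v):
--     iz = v[0]
--     de = v[len(v)-1]
--     if iz < de:
--         tipo = 1
--         for i in range(len(v)-1):
--             if v[i] > v[i+1]:
--                 tipo = 0
--                 break
--     elif iz > de:
--         tipo = 2
--         for i in range(len(v)-1):
--             if v[i] < v[i+1]:
--                 tipo = 0
--                 break
--     else:
--         tipo = 3
--         for i in range(len(v)-1):
--             if v[i] != v[i+1]:
--                 tipo = 0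
--                 break
--     return tipo
-- ===== SOURCE B (Python) =====
-- def deteccion_de_orden(v):
--     iz = v[0]
--     de = v[-1]
--     if iz < de:
--         return 1 if v == sorted(v) else 0
--     elif iz > de:
--         return 2 if v == sorted(v, reverse=True) else 0
--     else:
--         return 3 if all(x == iz for x in v) else 0
-- ===== Notes on version B (the rewrite author's own statement) =====
-- stated objective: idiomatic
-- what changed: Replaced the three hand-written adjacent-pair break loops with sort-then-compare (v == sorted(v) / sorted(v, reverse=True)) and an all()-equality check, keeping the first-vs-last branch selection.
import Mathlib
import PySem

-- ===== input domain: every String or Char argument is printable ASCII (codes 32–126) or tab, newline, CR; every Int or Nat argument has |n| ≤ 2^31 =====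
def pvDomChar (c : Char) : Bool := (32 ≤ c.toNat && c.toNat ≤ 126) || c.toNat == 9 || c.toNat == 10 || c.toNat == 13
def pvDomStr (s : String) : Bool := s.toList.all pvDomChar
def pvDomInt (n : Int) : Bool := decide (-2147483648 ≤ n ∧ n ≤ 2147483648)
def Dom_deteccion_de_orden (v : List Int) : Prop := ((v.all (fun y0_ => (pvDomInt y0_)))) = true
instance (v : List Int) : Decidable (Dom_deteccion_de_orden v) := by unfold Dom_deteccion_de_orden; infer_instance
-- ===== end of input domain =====

-- B replaces A's three adjacent-pair break loops with sort-then-compare / all-equal checks (idiomatic, not faster).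

-- ===== PORT A =====
-- A's 'for i in range(len(v)-1): if p(v[i], v[i+1]): tipo = 0; break' loop:
-- recursion over the index list, returning true iff the break fired.
def pvBreakScan (v : List Int) (p : Int → Int → Bool) : List Int → Bool
  | [] => false
  | i :: rest =>
      if p (PySem.List.pyGetD v i 0) (PySem.List.pyGetD v (i + 1) 0) then true
      else pvBreakScan v p rest

def deteccion_de_orden (v : List Int) : Int :=
  let iz := PySem.List.pyGetD v 0 0
  let de := PySem.List.pyGetD v ((v.length : Int) - 1) 0
  if iz < de then
    if pvBreakScan v (fun a b => decide (b < a)) (PySem.List.pyRange 0 ((v.length : Int) - 1) 1) then 0 else 1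
  else if iz > de then
    if pvBreakScan v (fun a b => decide (a < b)) (PySem.List.pyRange 0 ((v.length : Int) - 1) 1) then 0 else 2
  else
    if pvBreakScan v (fun a b => a != b) (PySem.List.pyRange 0 ((v.length : Int) - 1) 1) then 0 else 3

-- ===== PORT B =====
def deteccion_de_orden_alt (v : List Int) : Int :=
  let iz := PySem.List.pyGetD v 0 0
  let de := PySem.List.pyGetD v (-1) 0
  if iz < de then
    if v = PySem.List.sorted v (fun x => x) false then 1 else 0
  else if iz > de then
    if v = PySem.List.sorted v (fun x => x) true then 2 else 0
  else
    if v.all (fun x => x == iz) then 3 else 0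

-- ===== PRECONDITION & SPEC =====
-- A raises IndexError on the empty list (v[0]); Pre_ excludes exactly that input.
def Pre_deteccion_de_orden (v : List Int) : Prop := v ≠ []
instance (v : List Int) : Decidable (Pre_deteccion_de_orden v) := by unfold Pre_deteccion_de_orden; infer_instance
def pvWitness_deteccion_de_orden : List Int := [1, 2, 3]

def Spec_deteccion_de_orden (v : List Int) (out : Int) : Prop := out = deteccion_de_orden_alt v
instance (v : List Int) (out : Int) : Decidable (Spec_deteccion_de_orden v out) := by unfold Spec_deteccion_de_orden; infer_instance

-- ===== CLAIM (what is proved, stated in full; the proofs are below) =====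
def Claim_equal_deteccion_de_orden : Prop := ∀ (v : List Int), Dom_deteccion_de_orden v → Pre_deteccion_de_orden v → Spec_deteccion_de_orden v (deteccion_de_orden v)

-- ===== LEMMAS AND PROOFS =====

-- A's break loop returns false iff no adjacent pair from index a on satisfies p.
lemma pvBreakScan_aux (v : List Int) (p : Int → Int → Bool) :
    ∀ (k a : Nat), v.length - a = k →
      (pvBreakScan v p (PySem.List.pyRange (a : Int) ((v.length : Int) - 1) 1) = false ↔
        ∀ (i : Nat), a ≤ i → ∀ (h : i + 1 < v.length), p v[i] v[i + 1] = false) := by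
  intro k
  induction k with
  | zero =>
      intro a ha
      rw [PySem.List.pyRange_one_eq_nil (by omega)]
      simp only [pvBreakScan]
      constructor
      · intro _ i hai h; omega
      · intro _; trivial
  | succ k ih =>
      intro a ha
      by_cases hlt : (a : Int) < (v.length : Int) - 1
      · rw [PySem.List.pyRange_one_cons hlt]
        have ha1 : a + 1 < v.length := by omega
        have e1 : PySem.List.pyGetD v (a : Int) 0 = v[a] :=
          PySem.List.pyGetD_ofNat (xs := v) a 0 (by omega)
        have e2 : PySem.List.pyGetD v (((a + 1 : Nat)) : Int) 0 = v[a + 1] :=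
          PySem.List.pyGetD_ofNat (xs := v) (a + 1) 0 ha1
        have hsub : ((a : Int) + 1) = (((a + 1 : Nat)) : Int) := by push_cast; ring
        simp only [pvBreakScan, e1, hsub, e2]
        have ihrec := ih (a + 1) (by omega)
        by_cases hp : p v[a] (v[a + 1]'ha1) = true
        · rw [if_pos hp]
          constructor
          · intro hfalse; cases hfalse
          · intro hall
            have := hall a (le_refl a) ha1
            rw [hp] at this; cases this
        · have hp' : p v[a] (v[a + 1]'ha1) = false := by
            cases hpb : p v[a] (v[a + 1]'ha1) with
            | true => exact absurd hpb hp
            | false => rfl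
          rw [if_neg (by simp [hp'])]
          rw [ihrec]
          constructor
          · intro hrest i hai h
            rcases Nat.eq_or_lt_of_le hai with rfl | hlt'
            · exact hp'
            · exact hrest i (by omega) h
          · intro hall i hai h
            exact hall i (by omega) h
      · rw [PySem.List.pyRange_one_eq_nil (by omega)]
        simp only [pvBreakScan]
        constructor
        · intro _ i hai h; omega
        · intro _; trivial

lemma pvBreakScan_false_iff (v : List Int) (p : Int → Int → Bool) :
    pvBreakScan v p (PySem.List.pyRange 0 ((v.length : Int) - 1) 1) = false ↔
      List.IsChain (fun a b => p a b = false) v := by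
  have h := pvBreakScan_aux v p v.length 0 (by omega)
  rw [List.isChain_iff_getElem]
  simpa using h

lemma pairwise_eq_of_all_eq (x : Int) : ∀ (t : List Int), (∀ y ∈ t, y = x) → List.Pairwise Eq (x :: t) := by
  intro t
  induction t with
  | nil => intro _; simp
  | cons y s ih =>
      intro hall
      have hy : y = x := hall y (by simp)
      subst hy
      have hs := ih (fun z hz => hall z (by simp [hz]))
      rw [List.pairwise_cons] at hs ⊢
      exact ⟨fun z hz => by
        rcases List.mem_cons.mp hz with rfl | hz'
        · rfl
        · exact (hs.1 z hz').symm ▸ rfl, by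
        rw [List.pairwise_cons]
        exact ⟨fun z hz => hs.1 z hz, hs.2⟩⟩

-- first element vs the rest: iz / de agreement between the two ports (nonempty v)
lemma pyGetD_last_eq (v : List Int) (hv : v ≠ []) :
    PySem.List.pyGetD v ((v.length : Int) - 1) 0 = PySem.List.pyGetD v (-1) 0 := by
  have hlen : 1 ≤ v.length := List.length_pos_iff.mpr hv
  have e1 : ((v.length : Int) - 1) = ((v.length - 1 : Nat) : Int) := by omega
  rw [e1, PySem.List.pyGetD_natCast, PySem.List.pyGetD_neg_one v 0 hv]
  rw [List.getLast_eq_getElem]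
  exact List.getD_eq_getElem v 0 (by omega)

-- branch 1: no descending adjacent pair ↔ v equals sorted(v)
lemma asc_iff (v : List Int) :
    List.IsChain (fun a b : Int => decide (b < a) = false) v ↔ v = PySem.List.sorted v (fun x => x) false := by
  have hch : (fun a b : Int => decide (b < a) = false) = (fun a b : Int => a ≤ b) := by
    funext a b; simp [not_lt]
  rw [hch]
  constructor
  · intro h
    have hp : List.Pairwise (fun a b : Int => a ≤ b) v := List.isChain_iff_pairwise.mp h
    exact (PySem.List.sorted_eq_self_of_pairwise v (fun x : Int => x) hp).symm
  · intro h
    apply List.isChain_iff_pairwise.mpr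
    have := PySem.List.sorted_pairwise (xs := v) (key := fun x : Int => x)
    rw [← h] at this
    exact this

-- branch 2: no ascending adjacent pair ↔ v equals sorted(v, reverse=True)
lemma desc_iff (v : List Int) :
    List.IsChain (fun a b : Int => decide (a < b) = false) v ↔ v = PySem.List.sorted v (fun x => x) true := by
  have hch : (fun a b : Int => decide (a < b) = false) = (fun a b : Int => b ≤ a) := by
    funext a b; simp [not_lt]
  rw [hch]
  constructor
  · intro h
    have hp : List.Pairwise (fun a b : Int => b ≤ a) v := List.isChain_iff_pairwise.mp h
    exact (PySem.List.sorted_rev_eq_self_of_pairwise v (fun x : Int => x) hp).symm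
  · intro h
    apply List.isChain_iff_pairwise.mpr
    have := PySem.List.sorted_pairwise_rev (xs := v) (key := fun x : Int => x)
    rw [← h] at this
    exact this

-- branch 3: no unequal adjacent pair ↔ every element equals the first
lemma eq_iff (x : Int) (t : List Int) :
    List.IsChain (fun a b : Int => (a != b) = false) (x :: t) ↔ (x :: t).all (fun y => y == x) = true := by
  have hch : (fun a b : Int => (a != b) = false) = (fun a b : Int => a = b) := by
    funext a b; simp [bne]
  rw [hch, List.isChain_iff_pairwise]
  simp only [List.all_cons, List.all_eq_true, beq_iff_eq, beq_self_eq_true, Bool.true_and]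
  constructor
  · intro h
    rw [List.pairwise_cons] at h
    exact fun y hy => (h.1 y hy).symm
  · intro h
    exact pairwise_eq_of_all_eq x t h

-- ===== VERDICT (by name: the statement is the Claim_ definition above) =====
theorem deteccion_de_orden_spec : Claim_equal_deteccion_de_orden := by
  intro v _ hpre
  unfold Spec_deteccion_de_orden
  obtain ⟨x, t, rfl⟩ : ∃ x s, v = x :: s := by
    cases v with
    | nil => exact absurd rfl hpre
    | cons x t => exact ⟨x, t, rfl⟩
  have hA1 := (pvBreakScan_false_iff (x :: t) (fun a b => decide (b < a))).trans (asc_iff (x :: t))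
  have hA2 := (pvBreakScan_false_iff (x :: t) (fun a b => decide (a < b))).trans (desc_iff (x :: t))
  have hA3 := (pvBreakScan_false_iff (x :: t) (fun a b => a != b)).trans (eq_iff x t)
  have hA1' : (pvBreakScan (x :: t) (fun a b => decide (b < a)) (PySem.List.pyRange 0 (((x :: t).length : Int) - 1) 1) = true) ↔ ¬ ((x :: t) = PySem.List.sorted (x :: t) (fun y => y) false) := by
    rw [← hA1]; simp
  have hA2' : (pvBreakScan (x :: t) (fun a b => decide (a < b)) (PySem.List.pyRange 0 (((x :: t).length : Int) - 1) 1) = true) ↔ ¬ ((x :: t) = PySem.List.sorted (x :: t) (fun y => y) true) := by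
    rw [← hA2]; simp
  have hA3' : (pvBreakScan (x :: t) (fun a b => a != b) (PySem.List.pyRange 0 (((x :: t).length : Int) - 1) 1) = true) ↔ ¬ ((x :: t).all (fun y => y == x) = true) := by
    rw [← hA3]; simp
  simp only [deteccion_de_orden, deteccion_de_orden_alt, PySem.List.pyGetD_zero_cons]
  rw [pyGetD_last_eq (x :: t) hpre]
  simp only [hA1', hA2', hA3']
  split_ifs <;> rfl
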